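-- pv_equiv track=rewrite | github.com/dankinsoid/ai-memory | plugins/ai-memory/mcp/server.py | _first_content_line
-- ===== SOURCE A (Python) =====
-- def _first_content_line(content: str) -> str:
--     """Return the first non-empty body line of a .md file, skipping front-matter.
--
--     Front-matter is delimited by leading/trailing '---' lines.
--     Returns empty string if no body content found.
--     """
--     in_fm = False
--     for i, line in enumerate(content.splitlines()):
--         if i == 0 and line.strip() == "---":
--             in_fm = True
--             continue
--         if in_fm:
--             if line.strip() == "---":
--                 in_fm = False
--             continue
--         stripped = line.strip()
--         if stripped:
--             return stripped
--     return ""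
-- ===== SOURCE B (Python) =====
-- def _first_content_line(content: str) -> str:
--     """Return the first non-empty body line of a .md file, skipping front-matter."""
--     lines = content.splitlines()
--     if lines and lines[0].strip() == "---":
--         body = []
--         for j in range(1, len(lines)):
--             if lines[j].strip() == "---":
--                 body = lines[j + 1:]
--                 break
--     else:
--         body = lines
--     for line in body:
--         s = line.strip()
--         if s:
--             return s
--     return ""
-- ===== Notes on version B (the rewrite author's own statement) =====
-- stated objective: alternative
-- what changed: B first computes the front-matter boundary (search for the closing '---' and slice the body out), then scans the body slice for the first non-empty stripped line, instead of threading an in_fm state flag through a single enumerate loop.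
import Mathlib
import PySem

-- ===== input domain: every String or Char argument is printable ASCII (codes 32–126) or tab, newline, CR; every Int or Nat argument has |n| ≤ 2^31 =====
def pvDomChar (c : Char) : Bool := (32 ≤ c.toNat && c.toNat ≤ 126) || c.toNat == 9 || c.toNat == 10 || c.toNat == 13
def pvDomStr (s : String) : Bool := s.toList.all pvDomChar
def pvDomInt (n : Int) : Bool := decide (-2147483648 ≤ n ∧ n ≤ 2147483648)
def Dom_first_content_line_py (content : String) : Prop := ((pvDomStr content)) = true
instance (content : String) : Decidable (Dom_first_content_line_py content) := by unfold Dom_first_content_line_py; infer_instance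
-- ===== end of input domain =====

-- B computes the front-matter boundary first (find the closing '---', slice out the body), then scans the body slice; A threads an in_fm flag through one enumerate loop. Alternative decomposition, same cost.


-- ===== PORT A =====
-- A's enumerate loop: state (i, in_fm), early return on a non-empty stripped line
def fclA_go (lines : List String) (i : Nat) (in_fm : Bool) : String :=
  match lines with
  | [] => ""
  | line :: rest =>
    if i == 0 && PySem.Str.strip line == "---" then
      fclA_go rest (i + 1) true
    else if in_fm then
      if PySem.Str.strip line == "---" then fclA_go rest (i + 1) false
      else fclA_go rest (i + 1) true
    else
      let stripped := PySem.Str.strip line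
      if stripped ≠ "" then stripped else fclA_go rest (i + 1) in_fm

def first_content_line_py (content : String) : String :=
  fclA_go (PySem.Str.splitlines content) 0 false

-- ===== PORT B =====
-- B's body slice: if the first line strips to '---', everything after the first later '---' (or [] if none); else all lines
def fclB_body (lines : List String) : List String :=
  match lines with
  | [] => []
  | first :: rest =>
    if PySem.Str.strip first == "---" then
      match rest.findIdx? (fun l => PySem.Str.strip l == "---") with
      | some j => rest.drop (j + 1)
      | none => []
    else first :: rest

-- B's final for-loop: first line of the body whose strip() is truthy
def fclB_first (body : List String) : String :=
  match body with
  | [] => ""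
  | line :: rest =>
    let s := PySem.Str.strip line
    if s ≠ "" then s else fclB_first rest

def first_content_line_py_alt (content : String) : String :=
  fclB_first (fclB_body (PySem.Str.splitlines content))

-- ===== PRECONDITION & SPEC =====
def Spec_first_content_line_py (content : String) (out : String) : Prop := out = first_content_line_py_alt content
instance (content : String) (out : String) : Decidable (Spec_first_content_line_py content out) := by unfold Spec_first_content_line_py; infer_instance

-- ===== CLAIM (what is proved, stated in full; the proofs are below) =====
def Claim_equal_first_content_line_py : Prop := ∀ (content : String), Dom_first_content_line_py content → Spec_first_content_line_py content (first_content_line_py content)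

-- ===== LEMMAS AND PROOFS =====

-- after line 0, with in_fm = false, A's loop is exactly B's final scan
theorem fclA_go_false_eq (lines : List String) : ∀ i : Nat, fclA_go lines (i + 1) false = fclB_first lines := by
  induction lines with
  | nil => intro i; rfl
  | cons l t ih =>
    intro i
    simp only [fclA_go, fclB_first]
    rw [if_neg (by simp), if_neg (by simp)]
    split
    · rfl
    · exact ih (i + 1)

-- after line 0, with in_fm = true, A's loop skips to after the next '---' and then scans — B's slice-then-scan
theorem fclA_go_true_eq (lines : List String) : ∀ i : Nat,
    fclA_go lines (i + 1) true =
      (match lines.findIdx? (fun l => PySem.Str.strip l == "---") with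
        | some j => fclB_first (lines.drop (j + 1))
        | none => "") := by
  induction lines with
  | nil => intro i; rfl
  | cons l t ih =>
    intro i
    simp only [fclA_go, List.findIdx?_cons]
    rw [if_neg (by simp), if_pos trivial]
    by_cases h : PySem.Str.strip l = "---"
    · have hb : (PySem.Str.strip l == "---") = true := by simp [h]
      simp only [hb, List.drop_succ_cons]
      exact fclA_go_false_eq t (i + 1)
    · have hb : (PySem.Str.strip l == "---") = false := by simp [h]
      simp only [hb, Bool.false_eq_true, if_false]
      rw [ih (i + 1)]
      cases hf : t.findIdx? (fun l => PySem.Str.strip l == "---") with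
      | none => simp
      | some j => simp

theorem fcl_main (lines : List String) :
    fclA_go lines 0 false = fclB_first (fclB_body lines) := by
  cases lines with
  | nil => rfl
  | cons first rest =>
    simp only [fclA_go, fclB_body]
    by_cases h : PySem.Str.strip first = "---"
    · have hb : (PySem.Str.strip first == "---") = true := by simp [h]
      simp only [hb, Bool.and_true, BEq.rfl]
      rw [fclA_go_true_eq rest 0]
      cases hf : rest.findIdx? (fun l => PySem.Str.strip l == "---") with
      | none => simp [fclB_first]
      | some j => simp
    · have hb : (PySem.Str.strip first == "---") = false := by simp [h]
      simp only [hb, Bool.and_false, Bool.false_eq_true, if_false, fclB_first]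
      split
      · rfl
      · exact fclA_go_false_eq rest 0

-- ===== VERDICT (by name: the statement is the Claim_ definition above) =====
theorem first_content_line_py_spec : Claim_equal_first_content_line_py := by
  intro content _
  unfold Spec_first_content_line_py first_content_line_py first_content_line_py_alt
  exact fcl_main (PySem.Str.splitlines content)
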